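-- pv_equiv track=rewrite | github.com/frankliness/Veo3 | dags/download_workflow_dag.py | estimate_download_time
-- ===== SOURCE A (Python) =====
-- def estimate_download_time(tasks: list) -> int:
--     """估算下载时间（秒）"""
--     # 简单估算：图像5秒，视频30秒
--     total_seconds = 0
--     for task in tasks:
--         if task['file_type'] == 'image':
--             total_seconds += 5
--         elif task['file_type'] == 'video':
--             total_seconds += 30
--     return total_seconds
-- ===== SOURCE B (Python) =====
-- def estimate_download_time(tasks: list) -> int:
--     """估算下载时间（秒）"""
--     # Tally file types first, then combine with a single closed-form expression.
--     types = [task['file_type'] for task in tasks]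
--     counts = {}
--     for ft in types:
--         counts[ft] = counts.get(ft, 0) + 1
--     return 5 * counts.get('image', 0) + 30 * counts.get('video', 0)
-- ===== Notes on version B (the rewrite author's own statement) =====
-- stated objective: alternative
-- what changed: Replaces the branchy running-sum loop by a tally-then-combine decomposition: build a frequency table of file types, then return the closed form 5*counts['image'] + 30*counts['video'].
import Mathlib
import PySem

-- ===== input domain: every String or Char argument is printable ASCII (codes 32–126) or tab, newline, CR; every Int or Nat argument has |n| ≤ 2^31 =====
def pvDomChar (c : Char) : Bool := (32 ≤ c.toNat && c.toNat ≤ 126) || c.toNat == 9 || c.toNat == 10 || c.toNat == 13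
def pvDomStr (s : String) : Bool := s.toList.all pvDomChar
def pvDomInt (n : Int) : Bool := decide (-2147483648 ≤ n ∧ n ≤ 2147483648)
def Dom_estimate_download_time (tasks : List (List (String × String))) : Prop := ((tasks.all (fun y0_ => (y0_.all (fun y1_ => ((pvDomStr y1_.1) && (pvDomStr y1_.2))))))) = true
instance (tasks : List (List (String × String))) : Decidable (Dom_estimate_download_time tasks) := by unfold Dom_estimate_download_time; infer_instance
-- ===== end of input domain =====

-- B replaces A's branchy running-sum loop by a tally-then-combine decomposition (frequency table, then one closed-form expression); equal cost, alternative structure.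


-- first-match lookup task['file_type'] on the assoc-list dict; total form used only under Pre_ (key present)
def pvFileType (task : List (String × String)) : String :=
  ((task.find? (fun p => p.1 == "file_type")).map Prod.snd).getD ""

-- ===== PORT A =====
def estimate_download_time (tasks : List (List (String × String))) : Int :=
  tasks.foldl (fun total task =>
    if pvFileType task = "image" then total + 5
    else if pvFileType task = "video" then total + 30
    else total) 0

-- ===== PORT B =====
def estimate_download_time_alt (tasks : List (List (String × String))) : Int :=
  let types := tasks.map pvFileType
  let counts := types.foldl (fun d ft => d.insert ft (d.getD ft 0 + 1)) (PySem.Dict.empty : PySem.Dict String Int)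
  5 * counts.getD "image" 0 + 30 * counts.getD "video" 0

-- ===== PRECONDITION & SPEC =====
-- Pre_ excludes tasks missing the 'file_type' key, on which A raises KeyError.
def Pre_estimate_download_time (tasks : List (List (String × String))) : Prop :=
  ∀ t ∈ tasks, "file_type" ∈ t.map Prod.fst
instance (tasks : List (List (String × String))) : Decidable (Pre_estimate_download_time tasks) := by unfold Pre_estimate_download_time; infer_instance
def pvWitness_estimate_download_time : (List (List (String × String))) :=
  ([[("file_type", "image")], [("file_type", "video")], [("file_type", "text")]])
def Spec_estimate_download_time (tasks : List (List (String × String))) (out : Int) : Prop := out = estimate_download_time_alt tasks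
instance (tasks : List (List (String × String))) (out : Int) : Decidable (Spec_estimate_download_time tasks out) := by unfold Spec_estimate_download_time; infer_instance

-- ===== CLAIM (what is proved, stated in full; the proofs are below) =====
def Claim_equal_estimate_download_time : Prop := ∀ (tasks : List (List (String × String))), Dom_estimate_download_time tasks → Pre_estimate_download_time tasks → Spec_estimate_download_time tasks (estimate_download_time tasks)

-- ===== LEMMAS AND PROOFS =====
lemma estA_foldl (tasks : List (List (String × String))) (t : Int) :
    tasks.foldl (fun total task =>
      if pvFileType task = "image" then total + 5
      else if pvFileType task = "video" then total + 30
      else total) t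
    = t + 5 * ((tasks.map pvFileType).count "image" : Int)
        + 30 * ((tasks.map pvFileType).count "video" : Int) := by
  induction tasks generalizing t with
  | nil => simp
  | cons hd tl ih =>
    simp only [List.foldl_cons, List.map_cons, ih]
    by_cases h1 : pvFileType hd = "image"
    · simp [h1, List.count_cons]; ring
    · by_cases h2 : pvFileType hd = "video"
      · simp [h1, h2, List.count_cons]; ring
      · simp [h1, h2, List.count_cons]

-- ===== VERDICT (by name: the statement is the Claim_ definition above) =====
theorem estimate_download_time_spec : Claim_equal_estimate_download_time := by
  intro tasks _ _
  unfold Spec_estimate_download_time estimate_download_time estimate_download_time_alt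
  rw [estA_foldl]
  simp [PySem.Dict.getD_foldl_insert_add_one]
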